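-- pv_equiv track=rewrite | github.com/dduan/TBN | calcneue/reduce_unit.py | simplify_unit
-- ===== SOURCE A (Python) =====
-- def simplify_unit(unit):
--     count = {}
--     result = (set(), set())
--     for u, deg in unit[0]:
--         count[u] = count.get(u, 0) + deg
--     for u, deg in unit[1]:
--         count[u] = count.get(u, 0) - deg
--     for u, deg in count.items():
--         if deg > 0: result[0].add((u, deg))
--         if deg < 0: result[1].add((u, -deg))
--     return result
-- ===== SOURCE B (Python) =====
-- def simplify_unit(unit):
--     # Dict-free alternative: merge both sides into one signed delta sequence,
--     # then repeatedly split off all occurrences of the first unit, summing them.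
--     deltas = list(unit[0]) + [(u, -d) for u, d in unit[1]]
--     pos, neg = set(), set()
--     while deltas:
--         u = deltas[0][0]
--         total = 0
--         rest = []
--         for v, d in deltas:
--             if v == u:
--                 total += d
--             else:
--                 rest.append((v, d))
--         if total > 0:
--             pos.add((u, total))
--         elif total < 0:
--             neg.add((u, -total))
--         deltas = rest
--     return (pos, neg)
-- ===== Notes on version B (the rewrite author's own statement) =====
-- stated objective: alternative
-- what changed: Replaces A's dict-based degree counting (two counting loops into a dict, then a split loop over its items) with a dict-free pass: merge both sides into one signed delta list and repeatedly peel off all occurrences of the first unit, summing them and emitting the positive/negative entry directly.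
import Mathlib
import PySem

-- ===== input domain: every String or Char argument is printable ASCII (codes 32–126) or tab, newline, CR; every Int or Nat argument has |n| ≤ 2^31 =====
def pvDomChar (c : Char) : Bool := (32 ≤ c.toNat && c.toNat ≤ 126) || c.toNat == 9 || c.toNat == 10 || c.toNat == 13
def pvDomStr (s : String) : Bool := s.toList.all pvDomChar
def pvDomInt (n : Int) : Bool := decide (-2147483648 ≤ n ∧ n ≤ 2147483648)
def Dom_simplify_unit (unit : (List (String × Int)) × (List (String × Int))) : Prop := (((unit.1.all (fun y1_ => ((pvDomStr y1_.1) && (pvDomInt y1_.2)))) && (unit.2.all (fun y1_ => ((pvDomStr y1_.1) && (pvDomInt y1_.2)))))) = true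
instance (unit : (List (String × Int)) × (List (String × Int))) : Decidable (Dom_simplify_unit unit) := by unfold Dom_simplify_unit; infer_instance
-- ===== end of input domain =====

-- B replaces A's dict counting with a dict-free peel-first-key grouping pass over one
-- merged signed delta list (objective: alternative decomposition; no speed claim).

-- ===== PORT A =====
def simplify_unit (unit : (List (String × Int)) × (List (String × Int))) : (List (String × Int)) × (List (String × Int)) :=
  let count : PySem.Dict String Int :=
    unit.1.foldl (fun c p => c.insert p.1 (c.getD p.1 0 + p.2)) PySem.Dict.empty
  let count :=
    unit.2.foldl (fun c p => c.insert p.1 (c.getD p.1 0 - p.2)) count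
  count.items.foldl (fun r p =>
    let r := if p.2 > 0 then (PySem.Set.add r.1 (p.1, p.2), r.2) else r
    if p.2 < 0 then (r.1, PySem.Set.add r.2 (p.1, -p.2)) else r)
    (PySem.Set.empty, PySem.Set.empty)

-- ===== PORT B =====
-- the 'while deltas:' loop of Source B: peel all occurrences of the first unit, sum them, recurse on the rest
def simplify_unit_go : List (String × Int) → List (String × Int) → List (String × Int) → (List (String × Int)) × (List (String × Int))
  | [], pos, neg => (pos, neg)
  | (u, d) :: t, pos, neg =>
    let total := d + ((t.filter (fun p => p.1 == u)).map (fun p => p.2)).sum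
    let rest := t.filter (fun p => p.1 != u)
    if total > 0 then simplify_unit_go rest (PySem.Set.add pos (u, total)) neg
    else if total < 0 then simplify_unit_go rest pos (PySem.Set.add neg (u, -total))
    else simplify_unit_go rest pos neg
termination_by l _ _ => l.length
decreasing_by all_goals
  simp only [List.length_unattach]
  exact Nat.lt_succ_of_le (le_trans (List.length_filter_le _ _) (by simp))

def simplify_unit_alt (unit : (List (String × Int)) × (List (String × Int))) : (List (String × Int)) × (List (String × Int)) :=
  let deltas := unit.1 ++ unit.2.map (fun p => (p.1, -p.2))
  simplify_unit_go deltas PySem.Set.empty PySem.Set.empty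


-- ===== PRECONDITION & SPEC =====
def Spec_simplify_unit (unit : (List (String × Int)) × (List (String × Int))) (out : (List (String × Int)) × (List (String × Int))) : Prop := out = simplify_unit_alt unit
instance (unit : (List (String × Int)) × (List (String × Int))) (out : (List (String × Int)) × (List (String × Int))) : Decidable (Spec_simplify_unit unit out) := by unfold Spec_simplify_unit; infer_instance

-- ===== CLAIM (what is proved, stated in full; the proofs are below) =====
def Claim_equal_simplify_unit : Prop := ∀ (unit : (List (String × Int)) × (List (String × Int))), Dom_simplify_unit unit → Spec_simplify_unit unit (simplify_unit unit)

-- ===== LEMMAS AND PROOFS =====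
def pvKeyTot (k : String) (l : List (String × Int)) : Int :=
  ((l.filter (fun p => p.1 == k)).map (fun p => p.2)).sum

def pvGather (l : List (String × Int)) : List (String × Int) :=
  (PySem.Set.ofList (l.map (fun p => p.1))).map (fun k => (k, pvKeyTot k l))

def pvPos (l : List (String × Int)) : List (String × Int) :=
  (pvGather l).filter (fun p => decide (0 < p.2))
def pvNeg (l : List (String × Int)) : List (String × Int) :=
  ((pvGather l).filter (fun p => decide (p.2 < 0))).map (fun p => (p.1, -p.2))

lemma pvKeyTot_nil (k : String) : pvKeyTot k [] = 0 := rfl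

lemma pvKeyTot_cons (k : String) (p : String × Int) (t : List (String × Int)) :
    pvKeyTot k (p :: t) = (if p.1 = k then p.2 else 0) + pvKeyTot k t := by
  simp only [pvKeyTot, List.filter_cons]
  by_cases h : p.1 = k
  · simp [h]
  · simp [h]

lemma pv_getD_foldl (l : List (String × Int)) (d : PySem.Dict String Int) (k : String) :
    (l.foldl (fun c p => c.insert p.1 (c.getD p.1 0 + p.2)) d).getD k 0
      = d.getD k 0 + pvKeyTot k l := by
  induction l generalizing d with
  | nil => simp [pvKeyTot_nil]
  | cons p t ih =>
    rw [List.foldl_cons, ih, PySem.Dict.getD_insert, pvKeyTot_cons]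
    by_cases h : k = p.1
    · subst h
      rw [if_pos rfl, if_pos rfl]; ring
    · rw [if_neg h, if_neg (fun hh => h hh.symm)]; ring

lemma pv_set_add_of_not_mem {α : Type} [BEq α] [LawfulBEq α] (s : List α) (x : α)
    (h : x ∉ s) : PySem.Set.add s x = s ++ [x] := by
  simp [PySem.Set.add, PySem.Set.contains, h]

lemma pv_foldl_add_filter {α : Type} [BEq α] [LawfulBEq α] (x : α) :
    ∀ (xs : List α) (s : List α), x ∈ s →
      xs.foldl PySem.Set.add s = (xs.filter (fun y => y != x)).foldl PySem.Set.add s := by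
  intro xs
  induction xs with
  | nil => intro s _; rfl
  | cons y t ih =>
    intro s hx
    by_cases h : y = x
    · subst h
      have hs : PySem.Set.add s y = s := by simp [PySem.Set.add, PySem.Set.contains, hx]
      simp only [List.foldl_cons, List.filter_cons, hs, bne_self_eq_false, Bool.false_eq_true,
        if_false]
      exact ih s hx
    · have hb : (y != x) = true := by simp [h]
      simp only [List.foldl_cons, List.filter_cons, hb, if_true]
      have hx' : x ∈ PySem.Set.add s y := by
        unfold PySem.Set.add
        split <;> simp [hx]
      exact ih (PySem.Set.add s y) hx'

lemma pv_foldl_add_cons {α : Type} [BEq α] [LawfulBEq α] (x : α) :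
    ∀ (ys : List α) (s : List α), x ∉ ys →
      ys.foldl PySem.Set.add (x :: s) = x :: ys.foldl PySem.Set.add s := by
  intro ys
  induction ys with
  | nil => intro s _; rfl
  | cons y t ih =>
    intro s hx
    have hyx : ¬ y = x := fun h => hx (by simp [h])
    have hstep : PySem.Set.add (x :: s) y = x :: PySem.Set.add s y := by
      have hbx : PySem.Set.contains (x :: s) y = PySem.Set.contains s y := by
        simp [PySem.Set.contains, hyx]
      unfold PySem.Set.add
      rw [hbx]
      split <;> rfl
    simp only [List.foldl_cons, hstep]
    exact ih (PySem.Set.add s y) (fun h => hx (List.mem_cons_of_mem _ h))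

lemma pv_ofList_cons (x : String) (xs : List String) :
    PySem.Set.ofList (x :: xs) = x :: PySem.Set.ofList (xs.filter (fun y => y != x)) := by
  have h0 : PySem.Set.ofList (x :: xs) = xs.foldl PySem.Set.add [x] := by
    rw [PySem.Set.ofList_eq_foldl]
    simp [PySem.Set.add, PySem.Set.contains]
  rw [h0, pv_foldl_add_filter x xs [x] (by simp),
    pv_foldl_add_cons x _ [] (by simp), PySem.Set.ofList_eq_foldl]

lemma pv_map_fst_filter (u : String) (t : List (String × Int)) :
    (t.filter (fun p => p.1 != u)).map (fun p : String × Int => p.1)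
      = (t.map (fun p : String × Int => p.1)).filter (fun y => y != u) := by
  induction t with
  | nil => rfl
  | cons p t ih =>
    simp only [List.filter_cons, List.map_cons]
    by_cases h : (p.1 != u) = true
    · simp [h, ih]
    · simp [h, ih]

lemma pvKeyTot_filter_ne (k u : String) (h : ¬ k = u) (t : List (String × Int)) :
    pvKeyTot k (t.filter (fun p => p.1 != u)) = pvKeyTot k t := by
  induction t with
  | nil => rfl
  | cons p t ih =>
    by_cases hp : p.1 = k
    · have hb : (p.1 != u) = true := by simp [hp, h]
      simp [pvKeyTot_cons, hp, h, ih]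
    · by_cases hu : (p.1 != u) = true
      · simp [hu, pvKeyTot_cons, hp, ih]
      · simp [hu, pvKeyTot_cons, hp, ih]

lemma pvGather_cons (u : String) (d : Int) (t : List (String × Int)) :
    pvGather ((u, d) :: t)
      = (u, d + pvKeyTot u t) :: pvGather (t.filter (fun p => p.1 != u)) := by
  unfold pvGather
  simp only [List.map_cons]
  rw [pv_ofList_cons, pv_map_fst_filter, List.map_cons]
  congr 1
  · rw [pvKeyTot_cons]; simp
  · apply List.map_congr_left
    intro k hk
    have hk' : ¬ k = u := by
      have hmem : k ∈ (t.map (fun p : String × Int => p.1)).filter (fun y => y != u) := by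
        simpa [PySem.Set.mem_ofList] using hk
      simp only [List.mem_filter, bne_iff_ne, ne_eq] at hmem
      exact hmem.2
    have hne : ¬ (u = k) := fun h => hk' h.symm
    show (k, pvKeyTot k ((u, d) :: t)) = (k, pvKeyTot k (t.filter (fun p => p.1 != u)))
    rw [pvKeyTot_cons, if_neg hne, zero_add, pvKeyTot_filter_ne k u hk' t]

lemma pvGather_nil : pvGather [] = [] := rfl

lemma pv_go_spec : ∀ (n : Nat) (l : List (String × Int)), l.length ≤ n →
    ∀ (pos neg : List (String × Int)),
      (∀ p ∈ l, p.1 ∉ pos.map (fun q : String × Int => q.1)) →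
      (∀ p ∈ l, p.1 ∉ neg.map (fun q : String × Int => q.1)) →
      simplify_unit_go l pos neg = (pos ++ pvPos l, neg ++ pvNeg l) := by
  intro n
  induction n with
  | zero =>
    intro l hl pos neg _ _
    have hnil : l = [] := List.eq_nil_of_length_eq_zero (Nat.le_zero.mp hl)
    subst hnil
    simp [simplify_unit_go, pvPos, pvNeg, pvGather_nil]
  | succ n ih =>
    intro l hl pos neg h1 h2
    rcases l with _ | ⟨⟨u, d⟩, t⟩
    · simp [simplify_unit_go, pvPos, pvNeg, pvGather_nil]
    · have hrest : (t.filter (fun p => p.1 != u)).length ≤ n :=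
        le_trans (List.length_filter_le _ _) (Nat.le_of_succ_le_succ hl)
      have hu_pos : u ∉ pos.map (fun q : String × Int => q.1) := h1 (u, d) (by simp)
      have hu_neg : u ∉ neg.map (fun q : String × Int => q.1) := h2 (u, d) (by simp)
      have hmem_rest : ∀ p ∈ t.filter (fun p : String × Int => p.1 != u), p ∈ t ∧ ¬ p.1 = u := by
        intro p hp
        simp only [List.mem_filter, bne_iff_ne, ne_eq] at hp
        exact hp
      have hsum : ((t.filter (fun p => p.1 == u)).map (fun p : String × Int => p.2)).sum
          = pvKeyTot u t := rfl
      have hPos : pvPos ((u, d) :: t)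
          = (if 0 < d + pvKeyTot u t then [(u, d + pvKeyTot u t)] else [])
            ++ pvPos (t.filter (fun p => p.1 != u)) := by
        rw [pvPos, pvGather_cons, List.filter_cons]
        by_cases h : (0:Int) < d + pvKeyTot u t
        · simp [h, pvPos]
        · simp [h, pvPos]
      have hNeg : pvNeg ((u, d) :: t)
          = (if d + pvKeyTot u t < 0 then [(u, -(d + pvKeyTot u t))] else [])
            ++ pvNeg (t.filter (fun p => p.1 != u)) := by
        rw [pvNeg, pvGather_cons, List.filter_cons]
        by_cases h : d + pvKeyTot u t < 0
        · simp [h, pvNeg]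
        · simp [h, pvNeg]
      rw [simplify_unit_go]
      simp only [hsum]
      by_cases hpos : d + pvKeyTot u t > 0
      · rw [if_pos hpos]
        have hnotmem : (u, d + pvKeyTot u t) ∉ pos := fun hm =>
          hu_pos (by simpa using List.mem_map_of_mem (f := fun q : String × Int => q.1) hm)
        rw [pv_set_add_of_not_mem pos _ hnotmem]
        rw [ih _ hrest _ _
          (by
            intro p hp
            rcases hmem_rest p hp with ⟨hpt, hpu⟩
            simp only [List.map_append, List.mem_append, List.map_cons, List.map_nil,
              List.mem_singleton]
            rintro (hin | hin)
            · exact h1 p (List.mem_cons_of_mem _ hpt) hin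
            · exact hpu hin)
          (by
            intro p hp
            exact h2 p (List.mem_cons_of_mem _ (hmem_rest p hp).1))]
        rw [hPos, hNeg, if_pos hpos, if_neg (by omega : ¬ d + pvKeyTot u t < 0)]
        simp
      · rw [if_neg hpos]
        by_cases hneg : d + pvKeyTot u t < 0
        · rw [if_pos hneg]
          have hnotmem : (u, -(d + pvKeyTot u t)) ∉ neg := fun hm =>
            hu_neg (by simpa using List.mem_map_of_mem (f := fun q : String × Int => q.1) hm)
          rw [pv_set_add_of_not_mem neg _ hnotmem]
          rw [ih _ hrest _ _
            (by
              intro p hp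
              exact h1 p (List.mem_cons_of_mem _ (hmem_rest p hp).1))
            (by
              intro p hp
              rcases hmem_rest p hp with ⟨hpt, hpu⟩
              simp only [List.map_append, List.mem_append, List.map_cons, List.map_nil,
                List.mem_singleton]
              rintro (hin | hin)
              · exact h2 p (List.mem_cons_of_mem _ hpt) hin
              · exact hpu hin)]
          rw [hPos, hNeg, if_neg (by omega : ¬ (0:Int) < d + pvKeyTot u t), if_pos hneg]
          simp
        · rw [if_neg hneg]
          rw [ih _ hrest _ _
            (by intro p hp; exact h1 p (List.mem_cons_of_mem _ (hmem_rest p hp).1))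
            (by intro p hp; exact h2 p (List.mem_cons_of_mem _ (hmem_rest p hp).1))]
          rw [hPos, hNeg, if_neg (by omega : ¬ (0:Int) < d + pvKeyTot u t), if_neg hneg]
          simp

lemma pv_split_spec : ∀ (xs s1 s2 : List (String × Int)),
    (∀ p ∈ xs, p.1 ∉ s1.map (fun q : String × Int => q.1)) →
    (∀ p ∈ xs, p.1 ∉ s2.map (fun q : String × Int => q.1)) →
    (xs.map (fun q : String × Int => q.1)).Nodup →
    xs.foldl (fun r p =>
        let r := if p.2 > 0 then (PySem.Set.add r.1 (p.1, p.2), r.2) else r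
        if p.2 < 0 then (r.1, PySem.Set.add r.2 (p.1, -p.2)) else r) (s1, s2)
      = (s1 ++ xs.filter (fun p => decide (0 < p.2)),
         s2 ++ (xs.filter (fun p => decide (p.2 < 0))).map (fun p => (p.1, -p.2))) := by
  intro xs
  induction xs with
  | nil => intro s1 s2 _ _ _; simp
  | cons p t ih =>
    rcases p with ⟨u, v⟩
    intro s1 s2 h1 h2 hnd
    have hu_s1 : u ∉ s1.map (fun q : String × Int => q.1) := h1 (u, v) (by simp)
    have hu_s2 : u ∉ s2.map (fun q : String × Int => q.1) := h2 (u, v) (by simp)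
    simp only [List.map_cons] at hnd
    have hu_not : u ∉ t.map (fun q : String × Int => q.1) := (List.nodup_cons.mp hnd).1
    have hnd' : (t.map (fun q : String × Int => q.1)).Nodup := (List.nodup_cons.mp hnd).2
    have hut : ∀ p ∈ t, ¬ p.1 = u := by
      intro p hp hcontra
      exact hu_not (by
        rw [← hcontra]
        exact List.mem_map_of_mem (f := fun q : String × Int => q.1) hp)
    simp only [List.foldl_cons, List.filter_cons]
    by_cases hv : (0:Int) < v
    · have hv' : ¬ v < 0 := by omega
      simp only [gt_iff_lt, hv, if_true, hv', if_false]
      have hnotmem : (u, v) ∉ s1 := fun hm =>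
        hu_s1 (by simpa using List.mem_map_of_mem (f := fun q : String × Int => q.1) hm)
      rw [pv_set_add_of_not_mem s1 _ hnotmem]
      rw [ih (s1 ++ [(u, v)]) s2
        (by
          intro p hp
          simp only [List.map_append, List.mem_append, List.map_cons, List.map_nil,
            List.mem_singleton]
          rintro (hin | hin)
          · exact h1 p (List.mem_cons_of_mem _ hp) hin
          · exact hut p hp hin)
        (by intro p hp; exact h2 p (List.mem_cons_of_mem _ hp)) hnd']
      simp
    · by_cases hv' : v < 0
      · simp only [gt_iff_lt, hv, if_false, hv', if_true]
        have hnotmem : (u, -v) ∉ s2 := fun hm =>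
          hu_s2 (by simpa using List.mem_map_of_mem (f := fun q : String × Int => q.1) hm)
        rw [pv_set_add_of_not_mem s2 _ hnotmem]
        rw [ih s1 (s2 ++ [(u, -v)])
          (by intro p hp; exact h1 p (List.mem_cons_of_mem _ hp))
          (by
            intro p hp
            simp only [List.map_append, List.mem_append, List.map_cons, List.map_nil,
              List.mem_singleton]
            rintro (hin | hin)
            · exact h2 p (List.mem_cons_of_mem _ hp) hin
            · exact hut p hp hin) hnd']
        simp
      · simp only [gt_iff_lt, hv, if_false, hv', if_false]
        rw [ih s1 s2
          (by intro p hp; exact h1 p (List.mem_cons_of_mem _ hp))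
          (by intro p hp; exact h2 p (List.mem_cons_of_mem _ hp)) hnd']
        simp

lemma pv_sub_fold (l2 : List (String × Int)) (c : PySem.Dict String Int) :
    l2.foldl (fun c p => c.insert p.1 (c.getD p.1 0 - p.2)) c
      = (l2.map (fun p => (p.1, -p.2))).foldl
          (fun c p => c.insert p.1 (c.getD p.1 0 + p.2)) c := by
  induction l2 generalizing c with
  | nil => rfl
  | cons p t ih =>
    have hins : c.insert p.1 (c.getD p.1 0 - p.2) = c.insert p.1 (c.getD p.1 0 + -p.2) := by
      rw [sub_eq_add_neg]
    rw [List.map_cons, List.foldl_cons, List.foldl_cons, hins, ih]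

lemma pv_main (unit : (List (String × Int)) × (List (String × Int))) :
    simplify_unit unit = simplify_unit_alt unit := by
  simp only [simplify_unit, simplify_unit_alt]
  set deltas := unit.1 ++ unit.2.map (fun p => (p.1, -p.2)) with hdeltas
  have hfold : unit.2.foldl (fun c p => c.insert p.1 (c.getD p.1 0 - p.2))
      (unit.1.foldl (fun c p => c.insert p.1 (c.getD p.1 0 + p.2)) PySem.Dict.empty)
      = deltas.foldl (fun c p => c.insert p.1 (c.getD p.1 0 + p.2)) PySem.Dict.empty := by
    rw [hdeltas, List.foldl_append, pv_sub_fold]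
  rw [hfold]
  set c := deltas.foldl (fun c p => c.insert p.1 (c.getD p.1 0 + p.2)) PySem.Dict.empty with hc
  have hkeys : c.keys = PySem.Set.ofList (deltas.map (fun p => p.1)) := by
    rw [hc, PySem.Dict.keys_foldl_insert_key (key := fun p : String × Int => p.1)
      (f := fun (d : PySem.Dict String Int) (x : String × Int) => d.getD x.1 0 + x.2)]
    simp [PySem.Set.update, PySem.Set.ofList_eq_foldl]
  have hnodup : c.keys.Nodup := by
    rw [hc]
    exact PySem.Dict.nodup_keys_foldl_insert_key _ _ _ _ (by simp)
  have hitems : c.items = pvGather deltas := by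
    rw [PySem.Dict.items_eq_map_keys c hnodup 0, hkeys, pvGather]
    apply List.map_congr_left
    intro k _
    have hval := pv_getD_foldl deltas PySem.Dict.empty k
    simp only [PySem.Dict.getD_empty, zero_add] at hval
    rw [← hc] at hval
    rw [hval]
  rw [hitems]
  rw [pv_split_spec (pvGather deltas) PySem.Set.empty PySem.Set.empty
    (by intro p hp; simp [PySem.Set.empty])
    (by intro p hp; simp [PySem.Set.empty])
    (by
      simp only [pvGather, List.map_map]
      have : ((fun q : String × Int => q.1) ∘ fun k => (k, pvKeyTot k deltas)) = id := rfl
      rw [this, List.map_id]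
      exact PySem.Set.nodup_ofList _)]
  rw [pv_go_spec deltas.length deltas le_rfl PySem.Set.empty PySem.Set.empty
    (by intro p hp; simp [PySem.Set.empty])
    (by intro p hp; simp [PySem.Set.empty])]
  simp [PySem.Set.empty, pvPos, pvNeg]

-- ===== VERDICT (by name: the statement is the Claim_ definition above) =====
theorem simplify_unit_spec : Claim_equal_simplify_unit := by
  intro unit _
  show simplify_unit unit = simplify_unit_alt unit
  exact pv_main unit
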